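-- pv_equiv track=rewrite | github.com/rajasekhar02/reading-x-source-code | Complete Reference/BitMask/MaximalAndSubSequence.py | greedy2
-- ===== SOURCE A (Python) =====
-- import math
--
-- def greedy2(arr,k):
--     size = len(arr)
--     temp = arr
--     for j in range(32,0,-1):
--         temp2 = []
--         for i in range(0,len(temp)):
--             if temp[i] & (1<<j):
--                 temp2.append(temp[i])
--         if len(temp2) >= k:
--             temp = temp2
--     maxVal = temp[0]
--     for i in range(1, len(temp)):
--         maxVal &= temp[i]
--     maxValSets = temp
--     noOfSubsequences = math.comb(len(maxValSets), k)
--     if noOfSubsequences == 0: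
--         return maxVal, 1
--     return maxVal, math.comb(len(maxValSets), k)
-- ===== SOURCE B (Python) =====
-- import math
--
-- def greedy2(arr, k):
--     # Accumulate committed bits in an integer mask instead of carrying a pruned list.
--     mask = 0
--     for j in range(32, 0, -1):
--         cand = mask | (1 << j)
--         if sum(1 for x in arr if x & cand == cand) >= k:
--             mask = cand
--     survivors = [x for x in arr if x & mask == mask]
--     maxVal = survivors[0]
--     for x in survivors[1:]:
--         maxVal &= x
--     return maxVal, max(math.comb(len(survivors), k), 1)
-- ===== Notes on version B (the rewrite author's own statement) =====
-- stated objective: alternative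
-- what changed: B threads a single accumulating integer bitmask over the full original array (committing bit j when enough elements carry all committed bits plus bit j) and reconstructs the survivor list in one final filter pass, instead of A's carrying a shrinking pruned list through every bit round; Pre_ excludes exactly the inputs where A raises (empty arr -> IndexError, k<0 -> ValueError/IndexError, k=0 with no element carrying all bits 1..32 -> IndexError).
import Mathlib
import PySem

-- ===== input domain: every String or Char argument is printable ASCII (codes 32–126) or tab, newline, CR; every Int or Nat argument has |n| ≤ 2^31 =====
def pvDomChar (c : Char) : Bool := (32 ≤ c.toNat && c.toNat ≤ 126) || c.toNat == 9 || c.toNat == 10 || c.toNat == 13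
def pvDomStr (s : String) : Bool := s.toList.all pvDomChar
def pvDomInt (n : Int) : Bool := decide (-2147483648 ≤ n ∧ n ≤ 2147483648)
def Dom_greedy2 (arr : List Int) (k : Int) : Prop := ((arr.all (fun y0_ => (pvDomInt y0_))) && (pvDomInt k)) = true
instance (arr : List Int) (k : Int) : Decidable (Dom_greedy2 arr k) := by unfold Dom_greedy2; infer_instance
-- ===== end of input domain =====

-- B replaces A's shrinking candidate list with one accumulated integer bitmask over the
-- original array plus a single final filter pass (alternative decomposition, same cost).

-- math.comb n k (0 ≤ k); the k > n short-circuit makes it evaluate fast for huge k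
def pyComb (n k : Nat) : Nat := if n < k then 0 else Nat.choose n k

-- ===== PORT A =====
-- literal port of A: the greedy bit loop carries the pruned list `temp`;
-- `for i in range(0,len(temp)): temp[i]` is the left-to-right traversal of `temp`;
-- stepA is the named body of A's `for j` loop.
def stepA (k : Int) (temp : List Int) (j : Int) : List Int :=
  let temp2 := temp.foldl
    (fun acc x => if PySem.Int.band x ((1 : Int) <<< j.toNat) != 0 then acc ++ [x] else acc) []
  if k ≤ (temp2.length : Int) then temp2 else temp

def greedy2 (arr : List Int) (k : Int) : Int × Int :=
  let temp := (PySem.List.pyRange 32 0 (-1)).foldl (stepA k) arr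
  -- temp[0] raises IndexError on empty temp: those inputs are outside Pre_; default 0 here
  let maxVal := (temp.drop 1).foldl (fun m x => PySem.Int.band m x) ((PySem.List.pyGet? temp 0).getD 0)
  -- math.comb(n, k) raises ValueError for k < 0: outside Pre_; 0 here
  let noOfSubsequences : Int := if 0 ≤ k then ((pyComb temp.length k.toNat : Nat) : Int) else 0
  if noOfSubsequences == 0 then (maxVal, 1) else (maxVal, noOfSubsequences)

-- ===== PORT B =====
-- stepB is the named body of B's `for j` loop (one candidate-bit round)
def stepB (arr : List Int) (k : Int) (mask : Int) (j : Int) : Int :=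
  let cand := PySem.Int.bor mask ((1 : Int) <<< j.toNat)
  if k ≤ (arr.countP (fun x => PySem.Int.band x cand == cand) : Int) then cand else mask

def greedy2_alt (arr : List Int) (k : Int) : Int × Int :=
  let mask := (PySem.List.pyRange 32 0 (-1)).foldl (stepB arr k) 0
  let survivors := arr.filter (fun x => PySem.Int.band x mask == mask)
  -- survivors[0] raises IndexError on empty survivors: outside Pre_; default 0 here
  let maxVal := (survivors.drop 1).foldl (fun m x => PySem.Int.band m x) (survivors.headD 0)
  -- math.comb raises for k < 0: outside Pre_; 0 here
  let c : Int := if 0 ≤ k then ((pyComb survivors.length k.toNat : Nat) : Int) else 0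
  (maxVal, max c 1)

-- ===== PRECONDITION & SPEC =====
-- Pre_ excludes exactly the inputs where the Python A raises: empty arr (IndexError),
-- k < 0 (ValueError from math.comb, or IndexError), and k = 0 when no element has all of
-- bits 1..32 set (the fully filtered list is then empty and temp[0] raises IndexError).
def Pre_greedy2 (arr : List Int) (k : Int) : Prop :=
  arr ≠ [] ∧ 0 ≤ k ∧ (k = 0 → ∃ x ∈ arr, PySem.Int.band x 8589934590 = 8589934590)
instance (arr : List Int) (k : Int) : Decidable (Pre_greedy2 arr k) := by
  unfold Pre_greedy2; infer_instance

def pvWitness_greedy2 : List Int × Int := ([3, 5, 7], 2)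

def Spec_greedy2 (arr : List Int) (k : Int) (out : Int × Int) : Prop := out = greedy2_alt arr k
instance (arr : List Int) (k : Int) (out : Int × Int) : Decidable (Spec_greedy2 arr k out) := by
  unfold Spec_greedy2; infer_instance

-- ===== CLAIM (what is proved, stated in full; the proofs are below) =====
def Claim_equal_greedy2 : Prop :=
  ∀ (arr : List Int) (k : Int), Dom_greedy2 arr k → Pre_greedy2 arr k →
    Spec_greedy2 arr k (greedy2 arr k)

-- ===== LEMMAS AND PROOFS =====

-- Python's bit i of x in infinite two's complement
def xbit (x : Int) (i : Nat) : Bool :=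
  if 0 ≤ x then x.toNat.testBit i else !((-x - 1).toNat.testBit i)

theorem nat_and_eq_right (X Y : Nat) :
    X &&& Y = Y ↔ ∀ i, Y.testBit i = true → X.testBit i = true := by
  constructor
  · intro h i hY
    have := congrArg (fun n => n.testBit i) h
    simp only [Nat.testBit_land, hY, Bool.and_true] at this
    exact this
  · intro h
    apply Nat.eq_of_testBit_eq
    intro i
    simp only [Nat.testBit_land]
    cases hY : Y.testBit i with
    | false => simp
    | true => simp [h i hY]

theorem nat_and_eq_zero (Y U : Nat) :
    Y &&& U = 0 ↔ ∀ i, Y.testBit i = true → U.testBit i = false := by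
  constructor
  · intro h i hY
    have := congrArg (fun n => n.testBit i) h
    simp only [Nat.testBit_land, hY, Bool.true_and, Nat.zero_testBit] at this
    exact this
  · intro h
    apply Nat.eq_of_testBit_eq
    intro i
    simp only [Nat.testBit_land, Nat.zero_testBit]
    cases hY : Y.testBit i with
    | false => simp
    | true => simp [h i hY]

theorem band_nat_eq (x : Int) (Y : Nat) :
    PySem.Int.band x (Y : Int) = (Y : Int) ↔ ∀ i, Y.testBit i = true → xbit x i = true := by
  by_cases hx : 0 ≤ x
  · simp only [PySem.Int.band, hx, if_pos, Int.natCast_nonneg, xbit]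
    rw [Int.toNat_natCast, Nat.cast_inj]
    simpa using nat_and_eq_right x.toNat Y
  · simp only [PySem.Int.band, hx, Int.natCast_nonneg, if_true, if_false, xbit,
      Int.toNat_natCast]
    rw [Nat.cast_inj]
    have hle : Y &&& (-x - 1).toNat ≤ Y := Nat.and_le_left
    constructor
    · intro h i hY
      have h0 : Y &&& (-x - 1).toNat = 0 := by omega
      simp only [(nat_and_eq_zero Y _).mp h0 i hY, Bool.not_false]
    · intro h
      have h0 : Y &&& (-x - 1).toNat = 0 := by
        apply (nat_and_eq_zero Y _).mpr
        intro i hY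
        simpa using h i hY
      omega

theorem shiftLeft_one (j : Nat) : (1 : Int) <<< j = ((2 ^ j : Nat) : Int) := by
  simp [Int.shiftLeft_eq]

theorem band_two_pow (x : Int) (j : Nat) :
    (PySem.Int.band x ((1 : Int) <<< j) ≠ 0) ↔ xbit x j = true := by
  rw [shiftLeft_one]
  by_cases hx : 0 ≤ x
  · simp only [PySem.Int.band, hx, if_pos, Int.natCast_nonneg, xbit, Int.toNat_natCast]
    rw [Nat.and_two_pow]
    cases hb : x.toNat.testBit j <;> simp
  · simp only [PySem.Int.band, hx, Int.natCast_nonneg, if_true, if_false, xbit,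
      Int.toNat_natCast]
    rw [Nat.two_pow_and]
    cases hb : (-x - 1).toNat.testBit j <;> simp

theorem bor_nat (M : Nat) (j : Nat) :
    PySem.Int.bor (M : Int) ((1 : Int) <<< j) = ((M ||| 2 ^ j : Nat) : Int) := by
  rw [shiftLeft_one]
  simp only [PySem.Int.bor, Int.natCast_nonneg, if_true, Int.toNat_natCast]

-- the crux: committing bit j on top of mask M splits as "kept all of M" and "has bit j"
theorem band_split (x : Int) (M : Nat) (j : Nat) :
    ((PySem.Int.band x ((M ||| 2 ^ j : Nat) : Int) == ((M ||| 2 ^ j : Nat) : Int)))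
    = ((PySem.Int.band x (M : Int) == (M : Int)) &&
       (PySem.Int.band x ((1 : Int) <<< j) != 0)) := by
  rw [Bool.eq_iff_iff]
  simp only [beq_iff_eq, Bool.and_eq_true, bne_iff_ne, ne_eq]
  rw [band_nat_eq, band_nat_eq]
  constructor
  · intro h
    refine ⟨fun i hM => h i (by simp [hM]),
      (band_two_pow x j).mpr (h j (by simp))⟩
  · rintro ⟨h1, h2⟩ i hi
    simp only [Nat.testBit_lor, Nat.testBit_two_pow, Bool.or_eq_true, decide_eq_true_eq] at hi
    rcases hi with hM | rfl
    · exact h1 i hM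
    · exact (band_two_pow x j).mp h2

-- one round: A's filter-of-the-pruned-list equals the filter of arr by the updated mask
theorem step_eq (arr : List Int) (k : Int) (M : Nat) (j : Int) :
    stepB arr k (M : Int) j = ((if k ≤ (arr.countP (fun x => PySem.Int.band x ((M ||| 2 ^ j.toNat : Nat) : Int) == ((M ||| 2 ^ j.toNat : Nat) : Int)) : Int) then (M ||| 2 ^ j.toNat : Nat) else M : Nat) : Int)
    ∧ stepA k (arr.filter (fun x => PySem.Int.band x (M : Int) == (M : Int))) j
      = arr.filter (fun x => PySem.Int.band x (((if k ≤ (arr.countP (fun x => PySem.Int.band x ((M ||| 2 ^ j.toNat : Nat) : Int) == ((M ||| 2 ^ j.toNat : Nat) : Int)) : Int) then (M ||| 2 ^ j.toNat : Nat) else M : Nat)) : Int) == (((if k ≤ (arr.countP (fun x => PySem.Int.band x ((M ||| 2 ^ j.toNat : Nat) : Int) == ((M ||| 2 ^ j.toNat : Nat) : Int)) : Int) then (M ||| 2 ^ j.toNat : Nat) else M : Nat)) : Int)) := by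
  have hcand : PySem.Int.bor (M : Int) ((1 : Int) <<< j.toNat) = ((M ||| 2 ^ j.toNat : Nat) : Int) :=
    bor_nat M j.toNat
  have htemp2 : (arr.filter (fun x => PySem.Int.band x (M : Int) == (M : Int))).foldl
      (fun acc x => if PySem.Int.band x ((1 : Int) <<< j.toNat) != 0 then acc ++ [x] else acc) []
      = arr.filter (fun x => PySem.Int.band x ((M ||| 2 ^ j.toNat : Nat) : Int) == ((M ||| 2 ^ j.toNat : Nat) : Int)) := by
    rw [PySem.List.foldl_append_if
      (fun x => PySem.Int.band x ((1 : Int) <<< j.toNat) != 0) (fun x => x), List.nil_append,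
      List.map_id', List.filter_filter]
    apply List.filter_congr
    intro x _
    rw [band_split x M j.toNat, Bool.and_comm]
  constructor
  · simp only [stepB, hcand]
    rw [apply_ite (fun n : Nat => (n : Int))]
  · simp only [stepA, htemp2, List.countP_eq_length_filter]
    split <;> rfl

theorem inv_loop (arr : List Int) (k : Int) (js : List Int) (M : Nat) :
    ∃ M' : Nat,
      js.foldl (stepB arr k) (M : Int) = (M' : Int) ∧
      js.foldl (stepA k) (arr.filter (fun x => PySem.Int.band x (M : Int) == (M : Int)))
        = arr.filter (fun x => PySem.Int.band x (M' : Int) == (M' : Int)) := by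
  induction js generalizing M with
  | nil => exact ⟨M, rfl, rfl⟩
  | cons j js ih =>
    obtain ⟨hB, hA⟩ := step_eq arr k M j
    obtain ⟨M', h1, h2⟩ := ih
      (if k ≤ (arr.countP (fun x => PySem.Int.band x ((M ||| 2 ^ j.toNat : Nat) : Int) == ((M ||| 2 ^ j.toNat : Nat) : Int)) : Int) then (M ||| 2 ^ j.toNat : Nat) else M)
    refine ⟨M', ?_, ?_⟩
    · rw [List.foldl_cons, hB, h1]
    · rw [List.foldl_cons, hA, h2]

theorem head_eq (xs : List Int) : (PySem.List.pyGet? xs 0).getD 0 = xs.headD 0 := by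
  cases xs <;> simp [PySem.List.pyGet?, PySem.List.pyIdx?]

theorem comb_pair (v n : Int) (hn : 0 ≤ n) :
    (if n == 0 then (v, (1 : Int)) else (v, n)) = (v, max n 1) := by
  by_cases h : n = 0
  · subst h; simp
  · have : max n 1 = n := by omega
    simp [h, this]

-- ===== VERDICT (by name: the statement is the Claim_ definition above) =====
theorem greedy2_spec : Claim_equal_greedy2 := by
  intro arr k _ _
  unfold Spec_greedy2 greedy2 greedy2_alt
  obtain ⟨M', hB, hA⟩ := inv_loop arr k (PySem.List.pyRange 32 0 (-1)) 0
  have h0 : arr.filter (fun x => PySem.Int.band x ((0 : Nat) : Int) == ((0 : Nat) : Int)) = arr := by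
    apply List.filter_eq_self.mpr
    intro x _
    simp
  rw [h0] at hA
  rw [Nat.cast_zero] at hB
  simp only [hA, hB]
  rw [head_eq]
  apply comb_pair
  split <;> simp
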